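-- pv_equiv track=rewrite | github.com/JerryJohnThomas/deceptionNet | deceptionNet/runners/runner_ppo.py | _extract_vote_target
-- ===== SOURCE A (Python) =====
-- from typing import Any, Dict, Iterator, List, Optional, Tuple
--
-- def _extract_vote_target(action_text: str) -> Optional[int]:
--     digits = ''.join(ch for ch in action_text if ch.isdigit())
--     if not digits:
--         return None
--     try:
--         return int(digits[-1])
--     except ValueError:
--         return None
-- ===== SOURCE B (Python) =====
-- def _extract_vote_target(action_text):
--     for ch in reversed(action_text):
--         if ch.isdigit():
--             try:
--                 return int(ch)
--             except ValueError:
--                 return None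
--     return None
-- ===== Notes on version B (the rewrite author's own statement) =====
-- stated objective: simpler
-- what changed: Replaces collect-all-digits-then-index-last with a single reverse scan that early-exits at the first digit from the end, dropping the intermediate joined string.
import Mathlib
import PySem

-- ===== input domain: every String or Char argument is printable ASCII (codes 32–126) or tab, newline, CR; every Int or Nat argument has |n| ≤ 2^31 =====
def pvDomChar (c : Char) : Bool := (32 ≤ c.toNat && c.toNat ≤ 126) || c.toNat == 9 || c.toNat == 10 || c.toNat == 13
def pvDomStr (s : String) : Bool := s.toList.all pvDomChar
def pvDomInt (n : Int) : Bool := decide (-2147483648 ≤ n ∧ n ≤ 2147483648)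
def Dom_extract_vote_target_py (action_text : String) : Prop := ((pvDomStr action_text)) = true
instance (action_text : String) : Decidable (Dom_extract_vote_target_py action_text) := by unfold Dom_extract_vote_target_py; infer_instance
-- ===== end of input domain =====

-- B changes the algorithm shape only: a single reverse scan with early exit instead of
-- collecting all digits and indexing the last; same result on every input.

-- ===== PORT A =====
-- digits = ''.join(ch for ch in action_text if ch.isdigit()); if not digits: None;
-- try: int(digits[-1]) except ValueError: None
def extract_vote_target_py (action_text : String) : Option Int :=
  let digits : List Char := action_text.toList.filter PySem.Chars.isdigit
  if digits.isEmpty then none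
  else
    match PySem.List.pyGet? digits (-1) with
    | some c =>
      match PySem.Int.ofChars? [c] with
      | some n => some n
      | none => none
    | none => none

-- ===== PORT B =====
-- for ch in reversed(action_text): if ch.isdigit(): try: return int(ch) except: return None; return None
def pvAltLoop : List Char → Option Int
  | [] => none
  | c :: cs =>
    if PySem.Chars.isdigit c then
      match PySem.Int.ofChars? [c] with
      | some n => some n
      | none => none
    else pvAltLoop cs

def extract_vote_target_py_alt (action_text : String) : Option Int :=
  pvAltLoop action_text.toList.reverse

-- ===== PRECONDITION & SPEC =====
def Spec_extract_vote_target_py (action_text : String) (out : Option Int) : Prop := out = extract_vote_target_py_alt action_text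
instance (action_text : String) (out : Option Int) : Decidable (Spec_extract_vote_target_py action_text out) := by unfold Spec_extract_vote_target_py; infer_instance

-- ===== CLAIM (what is proved, stated in full; the proofs are below) =====
def Claim_equal_extract_vote_target_py : Prop := ∀ (action_text : String), Dom_extract_vote_target_py action_text → Spec_extract_vote_target_py action_text (extract_vote_target_py action_text)

-- ===== LEMMAS AND PROOFS =====

-- B's loop returns the try-int of the first digit found, i.e. of the head of the filtered list.
theorem pvAltLoop_eq_head_filter (cs : List Char) :
    pvAltLoop cs =
      match (cs.filter PySem.Chars.isdigit).head? with
      | some c =>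
        match PySem.Int.ofChars? [c] with
        | some n => some n
        | none => none
      | none => none := by
  induction cs with
  | nil => rfl
  | cons c cs ih =>
    by_cases h : PySem.Chars.isdigit c = true
    · simp [pvAltLoop, h]
    · simp [pvAltLoop, h, ih]

-- ===== VERDICT (by name: the statement is the Claim_ definition above) =====
theorem extract_vote_target_py_spec : Claim_equal_extract_vote_target_py := by
  intro s _
  unfold Spec_extract_vote_target_py extract_vote_target_py extract_vote_target_py_alt
  rw [pvAltLoop_eq_head_filter]
  rw [List.filter_reverse, List.head?_reverse]
  simp only [PySem.List.pyGet?_neg_one]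
  rcases h : (s.toList.filter PySem.Chars.isdigit).getLast? with _ | c
  · simp [List.getLast?_eq_none_iff.mp h]
  · have : ¬ (s.toList.filter PySem.Chars.isdigit).isEmpty := by
      intro he
      rw [List.isEmpty_iff.mp he] at h
      simp at h
    simp [this]
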